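-- pv_equiv track=rewrite | github.com/ilialecha/Programming_2 | Tests/4-12-22.py | longest_gc_neutral_of
-- ===== SOURCE A (Python) =====
-- def R_is_gc_neutral( DNA_Seq, low, high):
--     if low == high: return 0
--     return 1 + R_is_gc_neutral( DNA_Seq, low + 1, high ) if DNA_Seq[ low ] == 'G' or DNA_Seq[ low ] == 'C' else 0 + R_is_gc_neutral( DNA_Seq, low + 1, high )
--
-- def gc_neutral_base_case( DNA_Seq, size ):
--     if size % 2 == 0: return 2 * R_is_gc_neutral( DNA_Seq, 0, size) == size
--     return False
--
-- def longest_gc_neutral_of( DNA_Seq ):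
--     n = len ( DNA_Seq )
--     l = 0
--     longest = set()
--     for i in range( n-1 ):
--         for j in range ( i, n ):
--
--             if gc_neutral_base_case( DNA_Seq[ i : j + 1 ], j - i + 1 ) and j - i + 1 >= l:
--                 if j-i+1 == l:
--                     longest.add( DNA_Seq[ i : j + 1] )
--                 else:
--                     #New longest size found, restart longest list.
--                     longest = { DNA_Seq[ i : j + 1] }
--                     l = j - i + 1
--
--     return longest
-- ===== SOURCE B (Python) =====
-- def longest_gc_neutral_of(DNA_Seq):
--     n = len(DNA_Seq)
--     # prefix balances: pref[k] = (#GC - #non-GC) among the first k characters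
--     pref = [0]
--     b = 0
--     for ch in DNA_Seq:
--         b = b + (1 if ch == 'G' or ch == 'C' else -1)
--         pref.append(b)
--     l = 0
--     longest = set()
--     for i in range(n):
--         for j in range(i + 1, n):
--             # substring s[i:j+1] is GC-neutral iff pref[i] == pref[j+1]
--             if pref[i] == pref[j + 1] and j - i + 1 >= l:
--                 if j - i + 1 == l:
--                     longest.add(DNA_Seq[i:j + 1])
--                 else:
--                     longest = {DNA_Seq[i:j + 1]}
--                     l = j - i + 1
--     return longest
-- ===== Notes on version B (the rewrite author's own statement) =====
-- stated objective: faster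
-- what changed: B precomputes a prefix GC-balance list once and tests each substring for GC-neutrality by comparing two prefix values, removing A's recursive per-substring GC recount (and its evenness helper) entirely.
import Mathlib
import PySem

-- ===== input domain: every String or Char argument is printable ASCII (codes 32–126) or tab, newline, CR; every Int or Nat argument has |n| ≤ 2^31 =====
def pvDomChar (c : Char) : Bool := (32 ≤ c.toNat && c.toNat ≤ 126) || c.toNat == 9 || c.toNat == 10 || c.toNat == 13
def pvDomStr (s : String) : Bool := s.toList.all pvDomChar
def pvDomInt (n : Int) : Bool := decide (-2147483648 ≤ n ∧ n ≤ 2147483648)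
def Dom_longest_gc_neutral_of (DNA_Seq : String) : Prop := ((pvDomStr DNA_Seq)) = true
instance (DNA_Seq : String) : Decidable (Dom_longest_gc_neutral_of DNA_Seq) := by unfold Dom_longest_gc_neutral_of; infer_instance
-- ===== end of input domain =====

-- B replaces A's per-substring recursive GC recount (O(n^3)) by prefix balances built once (O(n^2)); same returned set.

-- ===== PORT A =====
-- Python recursion on (high - low); fuel = (high - low).toNat is exactly the number of steps.
def R_is_gc_neutral_aux (DNA_Seq : String) (low high : Int) : Nat → Int
  | 0 => 0
  | f + 1 =>
    if low = high then 0
    else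
      match PySem.Str.pyGet? DNA_Seq low with
      | some c =>
        if c = 'G' ∨ c = 'C' then 1 + R_is_gc_neutral_aux DNA_Seq (low + 1) high f
        else 0 + R_is_gc_neutral_aux DNA_Seq (low + 1) high f
      | none => 0 + R_is_gc_neutral_aux DNA_Seq (low + 1) high f
        -- none = IndexError; unreachable on A's calls (0 ≤ low < high ≤ len)

def R_is_gc_neutral (DNA_Seq : String) (low high : Int) : Int :=
  R_is_gc_neutral_aux DNA_Seq low high (high - low).toNat

def gc_neutral_base_case (DNA_Seq : String) (size : Int) : Bool :=
  if PySem.Int.mod size 2 = 0 then decide (2 * R_is_gc_neutral DNA_Seq 0 size = size)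
  else false

def longest_gc_neutral_of (DNA_Seq : String) : List String :=
  let n : Int := PySem.Str.len DNA_Seq
  let st :=
    (PySem.List.pyRange 0 (n - 1)).foldl (fun st i =>
      (PySem.List.pyRange i n).foldl (fun (st : Int × PySem.Set String) j =>
        let sub := PySem.Str.slice DNA_Seq (some i) (some (j + 1))
        if gc_neutral_base_case sub (j - i + 1) ∧ j - i + 1 ≥ st.1 then
          if j - i + 1 = st.1 then (st.1, PySem.Set.add st.2 sub)
          else (j - i + 1, PySem.Set.ofList [sub])
        else st) st)
      ((0 : Int), (PySem.Set.empty : PySem.Set String))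
  st.2

-- ===== PORT B =====
def longest_gc_neutral_of_alt (DNA_Seq : String) : List String :=
  let n : Int := PySem.Str.len DNA_Seq
  -- pref[k] = (#GC - #non-GC) among the first k characters, built once
  let pb := DNA_Seq.toList.foldl (fun (pb : List Int × Int) ch =>
      let b := pb.2 + (if ch = 'G' ∨ ch = 'C' then 1 else -1)
      (pb.1 ++ [b], b)) ([0], 0)
  let pref := pb.1
  let st :=
    (PySem.List.pyRange 0 n).foldl (fun st i =>
      (PySem.List.pyRange (i + 1) n).foldl (fun (st : Int × PySem.Set String) j =>
        if PySem.List.pyGetD pref i 0 = PySem.List.pyGetD pref (j + 1) 0 ∧ j - i + 1 ≥ st.1 then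
          if j - i + 1 = st.1 then (st.1, PySem.Set.add st.2 (PySem.Str.slice DNA_Seq (some i) (some (j + 1))))
          else (j - i + 1, PySem.Set.ofList [PySem.Str.slice DNA_Seq (some i) (some (j + 1))])
        else st) st)
      ((0 : Int), (PySem.Set.empty : PySem.Set String))
  st.2

-- ===== PRECONDITION & SPEC =====
def Spec_longest_gc_neutral_of (DNA_Seq : String) (out : List String) : Prop := out = longest_gc_neutral_of_alt DNA_Seq
instance (DNA_Seq : String) (out : List String) : Decidable (Spec_longest_gc_neutral_of DNA_Seq out) := by unfold Spec_longest_gc_neutral_of; infer_instance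

-- ===== CLAIM (what is proved, stated in full; the proofs are below) =====
def Claim_equal_longest_gc_neutral_of : Prop := ∀ (DNA_Seq : String), Dom_longest_gc_neutral_of DNA_Seq → Spec_longest_gc_neutral_of DNA_Seq (longest_gc_neutral_of DNA_Seq)

-- ===== LEMMAS AND PROOFS =====

def pvG (t : List Char) : Int := (t.countP (fun c => decide (c = 'G' ∨ c = 'C')) : Int)

theorem pvRaux_eq (fuel : Nat) : ∀ (s : String) (low : Nat), low + fuel ≤ s.toList.length →
    R_is_gc_neutral_aux s (low : Int) ((low : Int) + (fuel : Int)) fuel = pvG ((s.toList.drop low).take fuel) := by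
  induction fuel with
  | zero => intro s low h; simp [R_is_gc_neutral_aux, pvG]
  | succ f ih =>
    intro s low h
    have hlt : low < s.toList.length := by omega
    have hne : (low : Int) ≠ (low : Int) + ((f : Int) + 1) := by omega
    have hget : PySem.Str.pyGet? s (low : Int) = some (s.toList[low]) := by
      simp [PySem.Str.pyGet?_natCast, List.getElem?_eq_getElem hlt]
    have hdrop : s.toList.drop low = s.toList[low] :: s.toList.drop (low + 1) :=
      List.drop_eq_getElem_cons hlt
    have hrec : R_is_gc_neutral_aux s ((low : Int) + 1) ((low : Int) + ((f : Int) + 1)) f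
        = pvG ((s.toList.drop (low + 1)).take f) := by
      have := ih s (low + 1) (by omega)
      push_cast at this ⊢
      convert this using 2 <;> ring
    rw [R_is_gc_neutral_aux]
    push_cast
    rw [if_neg (by push_cast at hne ⊢; exact hne), hget]
    dsimp only
    rw [hdrop, List.take_succ_cons]
    by_cases hc : s.toList[low] = 'G' ∨ s.toList[low] = 'C'
    · rw [if_pos hc, hrec]; simp [pvG, List.countP_cons, hc]; push_cast; ring
    · rw [if_neg hc, hrec]; simp [pvG, List.countP_cons, hc]

theorem pvR_eq (t : String) : R_is_gc_neutral t 0 (t.toList.length : Int) = pvG t.toList := by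
  have h := pvRaux_eq t.toList.length t 0 (by omega)
  simp only [Nat.cast_zero, zero_add, List.drop_zero, List.take_length] at h
  rw [R_is_gc_neutral]
  simpa using h

theorem pvBase_eq (t : String) :
    gc_neutral_base_case t (t.toList.length : Int) = decide (2 * pvG t.toList = (t.toList.length : Int)) := by
  rw [gc_neutral_base_case, pvR_eq, PySem.Int.mod_eq_emod_of_pos (by norm_num)]
  rcases Nat.even_or_odd t.toList.length with he | ho
  · have h2 := Nat.even_iff.mp he
    rw [if_pos (by omega : ((t.toList.length : Int)) % 2 = 0)]
  · have h2 := Nat.odd_iff.mp ho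
    rw [if_neg (by omega : ¬ ((t.toList.length : Int)) % 2 = 0)]
    have : ¬ (2 * pvG t.toList = (t.toList.length : Int)) := by
      rw [pvG]; omega
    exact (decide_eq_false this).symm

def pvBal (cs : List Char) (k : Nat) : Int := 2 * pvG (cs.take k) - (k : Int)

theorem pvCond_eq (cs : List Char) (i j : Nat) (hij : i ≤ j) :
    decide (2 * pvG ((cs.drop i).take (j + 1 - i)) = ((j + 1 - i : Nat) : Int))
      = decide (pvBal cs i = pvBal cs (j + 1)) := by
  have hsplit : cs.take (j + 1) = cs.take i ++ (cs.drop i).take (j + 1 - i) := by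
    have h1 : j + 1 = i + (j + 1 - i) := by omega
    rw [h1, List.take_add]
    have h2 : i + (j + 1 - i) - i = j + 1 - i := by omega
    rw [h2]
  have hG : pvG (cs.take (j + 1)) = pvG (cs.take i) + pvG ((cs.drop i).take (j + 1 - i)) := by
    rw [hsplit, pvG, pvG, pvG, List.countP_append]; push_cast; ring
  rw [decide_eq_decide]
  rw [pvBal, pvBal, hG]
  omega

theorem pvG_cons (c : Char) (t : List Char) :
    pvG (c :: t) = (if c = 'G' ∨ c = 'C' then (1:Int) else 0) + pvG t := by
  by_cases hc : c = 'G' ∨ c = 'C' <;> simp [pvG, List.countP_cons, hc] <;> push_cast <;> ring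

theorem pvFold (cs : List Char) : ∀ (acc : List Int) (b : Int),
    (cs.foldl (fun (pb : List Int × Int) ch =>
        let b := pb.2 + (if ch = 'G' ∨ ch = 'C' then 1 else -1)
        (pb.1 ++ [b], b)) (acc, b))
      = (acc ++ (List.range cs.length).map (fun k => b + 2 * pvG (cs.take (k+1)) - ((k:Int)+1)),
         b + 2 * pvG cs - (cs.length : Int)) := by
  induction cs with
  | nil => intro acc b; simp [pvG]
  | cons c cs ih =>
    intro acc b
    simp only [List.foldl_cons]
    rw [ih]
    simp only [Prod.mk.injEq, List.length_cons]
    refine ⟨?_, ?_⟩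
    · rw [List.range_succ_eq_map, List.map_cons, List.map_map, List.append_assoc,
        List.singleton_append]
      congr 1
      congr 1
      · simp only [List.take_succ_cons, List.take_zero, pvG_cons]
        by_cases hc : c = 'G' ∨ c = 'C' <;> simp [hc, pvG] <;> ring
      · apply List.map_congr_left
        intro k _
        simp only [Function.comp_apply, Nat.succ_eq_add_one, List.take_succ_cons, pvG_cons]
        by_cases hc : c = 'G' ∨ c = 'C' <;> simp [hc] <;> push_cast <;> ring
    · simp only [pvG_cons]
      by_cases hc : c = 'G' ∨ c = 'C' <;> simp [hc] <;> push_cast <;> ring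

theorem pvPref_eq (s : String) :
    (s.toList.foldl (fun (pb : List Int × Int) ch =>
        let b := pb.2 + (if ch = 'G' ∨ ch = 'C' then 1 else -1)
        (pb.1 ++ [b], b)) ([0], 0)).1
      = (List.range (s.toList.length + 1)).map (pvBal s.toList) := by
  rw [pvFold, List.range_succ_eq_map]
  simp only [List.map_cons, List.map_map, List.singleton_append]
  have h0 : pvBal s.toList 0 = 0 := by simp [pvBal, pvG]
  rw [h0]
  congr 1
  apply List.map_congr_left
  intro k _
  simp only [Function.comp_apply, pvBal, Nat.succ_eq_add_one]
  push_cast; ring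


theorem pvCondAB (s : String) (i j : Int) (h0 : 0 ≤ i) (hij : i < j) (hj : j < (s.toList.length : Int)) :
    (gc_neutral_base_case (PySem.Str.slice s (some i) (some (j + 1))) (j - i + 1) = true)
      ↔ (PySem.List.pyGetD ((List.range (s.toList.length + 1)).map (pvBal s.toList)) i 0
          = PySem.List.pyGetD ((List.range (s.toList.length + 1)).map (pvBal s.toList)) (j + 1) 0) := by
  have hj0 : 0 ≤ j := by omega
  lift i to ℕ using h0 with i'
  lift j to ℕ using hj0 with j'
  have hij' : i' < j' := by exact_mod_cast hij
  have hjN : j' < s.toList.length := by exact_mod_cast hj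
  have hc1 : ((j' : Int) + 1) = ((j' + 1 : Nat) : Int) := by push_cast; ring
  have hslice : (PySem.Str.slice s (some (i' : Int)) (some ((j' : Int) + 1))).toList
      = (s.toList.drop i').take (j' + 1 - i') := by
    rw [PySem.Str.toList_slice, hc1]
    exact PySem.List.slice_natCast s.toList i' (j' + 1)
  have hlen : (PySem.Str.slice s (some (i' : Int)) (some ((j' : Int) + 1))).toList.length
      = j' + 1 - i' := by
    rw [hslice, List.length_take, List.length_drop]; omega
  have hsize : (j' : Int) - (i' : Int) + 1
      = ((PySem.Str.slice s (some (i' : Int)) (some ((j' : Int) + 1))).toList.length : Int) := by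
    rw [hlen]; omega
  rw [hsize, pvBase_eq]
  have hG : (2 : Int) * pvG (PySem.Str.slice s (some (i' : Int)) (some ((j' : Int) + 1))).toList
      = 2 * pvG ((s.toList.drop i').take (j' + 1 - i')) := by rw [hslice]
  rw [show (decide (2 * pvG (PySem.Str.slice s (some (i' : Int)) (some ((j' : Int) + 1))).toList
        = ((PySem.Str.slice s (some (i' : Int)) (some ((j' : Int) + 1))).toList.length : Int)))
      = decide (2 * pvG ((s.toList.drop i').take (j' + 1 - i')) = ((j' + 1 - i' : Nat) : Int)) from by
    rw [hG, hlen]]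
  rw [pvCond_eq s.toList i' j' (by omega)]
  have hget1 : PySem.List.pyGetD ((List.range (s.toList.length + 1)).map (pvBal s.toList)) (i' : Int) 0
      = pvBal s.toList i' := by
    rw [PySem.List.pyGetD_natCast, List.getD_eq_getElem?_getD, List.getElem?_map,
      List.getElem?_range (by omega : i' < s.toList.length + 1)]
    rfl
  have hget2 : PySem.List.pyGetD ((List.range (s.toList.length + 1)).map (pvBal s.toList)) ((j' : Int) + 1) 0
      = pvBal s.toList (j' + 1) := by
    rw [hc1, PySem.List.pyGetD_natCast, List.getD_eq_getElem?_getD, List.getElem?_map,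
      List.getElem?_range (by omega : j' + 1 < s.toList.length + 1)]
    rfl
  rw [hget1, hget2]
  exact decide_eq_true_iff

theorem pvStepEq (s : String) (i j : Int) (h0 : 0 ≤ i) (hij : i < j) (hj : j < (s.toList.length : Int))
    (st : Int × PySem.Set String) :
    (fun (st : Int × PySem.Set String) j =>
        if gc_neutral_base_case (PySem.Str.slice s (some i) (some (j + 1))) (j - i + 1) ∧ j - i + 1 ≥ st.1 then
          if j - i + 1 = st.1 then (st.1, PySem.Set.add st.2 (PySem.Str.slice s (some i) (some (j + 1))))
          else (j - i + 1, PySem.Set.ofList [PySem.Str.slice s (some i) (some (j + 1))])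
        else st) st j
      = (fun (st : Int × PySem.Set String) j =>
          if PySem.List.pyGetD ((List.range (s.toList.length + 1)).map (pvBal s.toList)) i 0
              = PySem.List.pyGetD ((List.range (s.toList.length + 1)).map (pvBal s.toList)) (j + 1) 0
              ∧ j - i + 1 ≥ st.1 then
            if j - i + 1 = st.1 then (st.1, PySem.Set.add st.2 (PySem.Str.slice s (some i) (some (j + 1))))
            else (j - i + 1, PySem.Set.ofList [PySem.Str.slice s (some i) (some (j + 1))])
          else st) st j := by
  have hc := pvCondAB s i j h0 hij hj
  by_cases hb : gc_neutral_base_case (PySem.Str.slice s (some i) (some (j + 1))) (j - i + 1) = true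
  · have hxy := hc.mp hb
    simp only [hb, hxy]
  · have hxy : ¬ (PySem.List.pyGetD ((List.range (s.toList.length + 1)).map (pvBal s.toList)) i 0
        = PySem.List.pyGetD ((List.range (s.toList.length + 1)).map (pvBal s.toList)) (j + 1) 0) :=
      fun h => hb (hc.mpr h)
    simp only [Bool.not_eq_true] at hb
    simp only [hb, hxy]
    simp

theorem pvDiagNoop (s : String) (i : Int) (st : Int × PySem.Set String) :
    (if gc_neutral_base_case (PySem.Str.slice s (some i) (some (i + 1))) (i - i + 1) ∧ i - i + 1 ≥ st.1 then
      if i - i + 1 = st.1 then (st.1, PySem.Set.add st.2 (PySem.Str.slice s (some i) (some (i + 1))))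
      else (i - i + 1, PySem.Set.ofList [PySem.Str.slice s (some i) (some (i + 1))])
    else st) = st := by
  have h1 : i - i + 1 = (1 : Int) := by ring
  have hb : gc_neutral_base_case (PySem.Str.slice s (some i) (some (i + 1))) 1 = false := by
    rw [gc_neutral_base_case]
    rw [if_neg (by decide : ¬ PySem.Int.mod 1 2 = 0)]
  simp only [h1, hb]
  simp

theorem pvInnerEq (s : String) (i : Int) (h0 : 0 ≤ i) (hi : i < (s.toList.length : Int))
    (st : Int × PySem.Set String) :
    (PySem.List.pyRange i (s.toList.length : Int)).foldl
        (fun (st : Int × PySem.Set String) j =>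
          if gc_neutral_base_case (PySem.Str.slice s (some i) (some (j + 1))) (j - i + 1) ∧ j - i + 1 ≥ st.1 then
            if j - i + 1 = st.1 then (st.1, PySem.Set.add st.2 (PySem.Str.slice s (some i) (some (j + 1))))
            else (j - i + 1, PySem.Set.ofList [PySem.Str.slice s (some i) (some (j + 1))])
          else st) st
      = (PySem.List.pyRange (i + 1) (s.toList.length : Int)).foldl
          (fun (st : Int × PySem.Set String) j =>
            if PySem.List.pyGetD ((List.range (s.toList.length + 1)).map (pvBal s.toList)) i 0
                = PySem.List.pyGetD ((List.range (s.toList.length + 1)).map (pvBal s.toList)) (j + 1) 0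
                ∧ j - i + 1 ≥ st.1 then
              if j - i + 1 = st.1 then (st.1, PySem.Set.add st.2 (PySem.Str.slice s (some i) (some (j + 1))))
              else (j - i + 1, PySem.Set.ofList [PySem.Str.slice s (some i) (some (j + 1))])
            else st) st := by
  rw [PySem.List.pyRange_one_cons hi, List.foldl_cons]
  simp only [pvDiagNoop]
  apply PySem.List.foldl_congr_mem
  intro acc j hjmem
  have hj := PySem.List.mem_pyRange_one.mp hjmem
  exact pvStepEq s i j h0 (by omega) (by omega) acc

theorem pvEmptyRange (a b : Int) (h : b ≤ a) : PySem.List.pyRange a b = [] := by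
  rw [PySem.List.pyRange_one]
  have : (b - a).toNat = 0 := by omega
  rw [this]
  simp

theorem pvMain (s : String) : longest_gc_neutral_of s = longest_gc_neutral_of_alt s := by
  have hpref := pvPref_eq s
  simp only [longest_gc_neutral_of, longest_gc_neutral_of_alt, PySem.Str.len_eq, hpref]
  rcases Nat.eq_zero_or_pos s.toList.length with hN | hN
  · rw [pvEmptyRange 0 ((s.toList.length : Int) - 1) (by omega),
      pvEmptyRange 0 (s.toList.length : Int) (by omega)]
    rfl
  · have h1 : PySem.List.pyRange 0 (s.toList.length : Int)
        = PySem.List.pyRange 0 ((s.toList.length : Int) - 1) ++ [(s.toList.length : Int) - 1] := by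
      have h2 := PySem.List.pyRange_one_succ_right
        (a := 0) (b := (s.toList.length : Int) - 1) (by omega)
      rw [show (s.toList.length : Int) - 1 + 1 = (s.toList.length : Int) by ring] at h2
      exact h2
    rw [h1, List.foldl_append, List.foldl_cons, List.foldl_nil]
    rw [show (s.toList.length : Int) - 1 + 1 = (s.toList.length : Int) by ring]
    rw [pvEmptyRange (s.toList.length : Int) (s.toList.length : Int) le_rfl, List.foldl_nil]
    apply congrArg Prod.snd
    apply PySem.List.foldl_congr_mem
    intro st i hmem
    have hi := PySem.List.mem_pyRange_one.mp hmem
    exact pvInnerEq s i (by omega) (by omega) st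

-- ===== VERDICT (by name: the statement is the Claim_ definition above) =====
theorem longest_gc_neutral_of_spec : Claim_equal_longest_gc_neutral_of := by
  intro s _
  unfold Spec_longest_gc_neutral_of
  exact pvMain s
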